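-- pv_equiv track=rewrite | github.com/satheeshgs/training | foobar/test_hench.py | stingy_lambs
-- ===== SOURCE A (Python) =====
-- def stingy_lambs(total_lambs): #for the stingy flow with a fibonacci series
--     a = 0
--     b = 1
--     sum = a+b
--     count = 0
--     while total_lambs >= b:
--         total_lambs -=b
--         count += 1
--         a = b
--         b = sum
--         sum = a+b
--     return count
-- ===== SOURCE B (Python) =====
-- def stingy_lambs(total_lambs):
--     # Pass 1: build the table of Fibonacci payouts (1, 1, 2, 3, 5, ...)
--     # that individually fit within total_lambs.
--     fibs = []
--     a, b = 0, 1
--     while b <= total_lambs: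
--         fibs.append(b)
--         a, b = b, a + b
--     # Pass 2: scan prefix sums; the answer is the largest k with S_k <= total_lambs.
--     count = 0
--     s = 0
--     for f in fibs:
--         if s + f > total_lambs:
--             break
--         s += f
--         count += 1
--     return count
-- ===== Notes on version B (the rewrite author's own statement) =====
-- stated objective: alternative
-- what changed: Replaces A's single destructive subtract-while loop by two separate passes: first build the table of Fibonacci terms not exceeding total_lambs, then scan that table with a running prefix sum and count while the sum stays within total_lambs.
import Mathlib
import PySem

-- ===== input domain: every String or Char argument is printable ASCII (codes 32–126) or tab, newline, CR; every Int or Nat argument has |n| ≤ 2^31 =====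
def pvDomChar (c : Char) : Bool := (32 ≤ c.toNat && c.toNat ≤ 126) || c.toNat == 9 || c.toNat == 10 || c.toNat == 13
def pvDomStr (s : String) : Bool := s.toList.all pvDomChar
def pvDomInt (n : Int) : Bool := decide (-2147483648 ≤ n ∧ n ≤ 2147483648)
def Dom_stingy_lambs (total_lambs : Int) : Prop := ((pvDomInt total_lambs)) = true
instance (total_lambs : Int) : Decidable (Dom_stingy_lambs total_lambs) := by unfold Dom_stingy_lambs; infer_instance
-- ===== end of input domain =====

-- B rewrites A's single destructive subtract-while loop as two separate passes
-- (build the Fibonacci table, then scan prefix sums); same return value, no speed claim.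

-- ===== PORT A =====
-- A's while loop; the '1 ≤ b' conjunct is a totality guard only (b starts at 1
-- and only grows, so it is always true on reachable states).
def stingyLoopA (total_lambs _a b sum count : Int) : Int :=
  if h : b ≤ total_lambs ∧ 1 ≤ b then
    stingyLoopA (total_lambs - b) b sum (b + sum) (count + 1)
  else count
termination_by total_lambs.toNat
decreasing_by omega

def stingy_lambs (total_lambs : Int) : Int :=
  stingyLoopA total_lambs 0 1 (0 + 1) 0

-- ===== PORT B =====
-- Pass 1 of Source B: collect Fibonacci terms b with b ≤ total; the '1 ≤ b ∧ 0 ≤ a ∧ a ≤ b'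
-- conjuncts are totality guards only (always true from the start state (0,1)).
def genFibs (total a b : Int) : List Int :=
  if _h : b ≤ total ∧ 1 ≤ b ∧ 0 ≤ a ∧ a ≤ b then
    b :: genFibs total b (a + b)
  else []
termination_by (2 * total + 1 - (a + b)).toNat
decreasing_by omega

-- Pass 2 of Source B: scan prefix sums, counting while they stay ≤ total.
def countPrefix (total : Int) (s count : Int) : List Int → Int
  | [] => count
  | f :: rest => if s + f > total then count else countPrefix total (s + f) (count + 1) rest

def stingy_lambs_alt (total_lambs : Int) : Int :=
  countPrefix total_lambs 0 0 (genFibs total_lambs 0 1)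

-- ===== PRECONDITION & SPEC =====
def Spec_stingy_lambs (total_lambs : Int) (out : Int) : Prop := out = stingy_lambs_alt total_lambs
instance (total_lambs : Int) (out : Int) : Decidable (Spec_stingy_lambs total_lambs out) := by unfold Spec_stingy_lambs; infer_instance

-- ===== CLAIM (what is proved, stated in full; the proofs are below) =====
def Claim_equal_stingy_lambs : Prop := ∀ (total_lambs : Int), Dom_stingy_lambs total_lambs → Spec_stingy_lambs total_lambs (stingy_lambs total_lambs)

-- ===== LEMMAS AND PROOFS =====

-- Loop invariant: A's remaining budget t plus B's accumulated prefix sum s is the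
-- original total; under the standing invariants the two loops compute the same count.
theorem loop_eq (n : Nat) :
    ∀ (t a b count s total : Int), t.toNat < n →
      1 ≤ b → 0 ≤ a → a ≤ b → 0 ≤ s → s + t = total →
      stingyLoopA t a b (a + b) count = countPrefix total s count (genFibs total a b) := by
  induction n with
  | zero => intro t a b count s total h; omega
  | succ n ih =>
    intro t a b count s total hn hb ha hab hs hst
    rw [stingyLoopA, genFibs]
    by_cases hcond : b ≤ t
    · have hbt : b ≤ total := by omega
      rw [dif_pos ⟨hcond, hb⟩, dif_pos ⟨hbt, hb, ha, hab⟩]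
      rw [countPrefix, if_neg (by omega : ¬ s + b > total)]
      exact ih (t - b) b (a + b) (count + 1) (s + b) total
        (by omega) (by omega) (by omega) (by omega) (by omega) (by omega)
    · rw [dif_neg (by tauto)]
      by_cases hbt : b ≤ total
      · rw [dif_pos ⟨hbt, hb, ha, hab⟩, countPrefix, if_pos (by omega : s + b > total)]
      · rw [dif_neg (by tauto), countPrefix]

-- ===== VERDICT (by name: the statement is the Claim_ definition above) =====
theorem stingy_lambs_spec : Claim_equal_stingy_lambs := by
  intro total _
  unfold Spec_stingy_lambs stingy_lambs stingy_lambs_alt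
  exact loop_eq (total.toNat + 1) total 0 1 0 0 total (by omega)
    (by norm_num) le_rfl (by norm_num) le_rfl (by omega)
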